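-- pv_equiv track=rewrite | github.com/SKxrda3/menu_tessract | app.py | group_by_rows
-- ===== SOURCE A (Python) =====
-- def group_by_rows(boxes, y_thresh=15):
--     boxes.sort(key=lambda b: b["y"])
--     rows, current_row, last_y = [], [], -1000
--     for box in boxes:
--         if abs(box["y"] - last_y) > y_thresh:
--             if current_row:
--                 rows.append(sorted(current_row, key=lambda b: b["x"]))
--             current_row = [box]
--         else:
--             current_row.append(box)
--         last_y = box["y"]
--     if current_row:
--         rows.append(sorted(current_row, key=lambda b: b["x"]))
--     return rows
-- ===== SOURCE B (Python) =====
-- def group_by_rows(boxes, y_thresh=15):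
--     boxes.sort(key=lambda b: b["y"])
--     if not boxes:
--         return []
--     n = len(boxes)
--     ys = [b["y"] for b in boxes]
--     cuts = [0] + [i for i in range(1, n) if ys[i] - ys[i - 1] > y_thresh] + [n]
--     return [sorted(boxes[a:b], key=lambda b: b["x"])
--             for a, b in zip(cuts, cuts[1:])]
-- ===== Notes on version B (the rewrite author's own statement) =====
-- stated objective: alternative
-- what changed: replaces A's streaming state machine (current_row/last_y accumulator with trailing flush) by staged passes: extract the y-list, compute the list of cut indices where the gap exceeds the threshold with a filtered range, then build each row by slicing the sorted list between adjacent cuts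
import Mathlib
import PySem

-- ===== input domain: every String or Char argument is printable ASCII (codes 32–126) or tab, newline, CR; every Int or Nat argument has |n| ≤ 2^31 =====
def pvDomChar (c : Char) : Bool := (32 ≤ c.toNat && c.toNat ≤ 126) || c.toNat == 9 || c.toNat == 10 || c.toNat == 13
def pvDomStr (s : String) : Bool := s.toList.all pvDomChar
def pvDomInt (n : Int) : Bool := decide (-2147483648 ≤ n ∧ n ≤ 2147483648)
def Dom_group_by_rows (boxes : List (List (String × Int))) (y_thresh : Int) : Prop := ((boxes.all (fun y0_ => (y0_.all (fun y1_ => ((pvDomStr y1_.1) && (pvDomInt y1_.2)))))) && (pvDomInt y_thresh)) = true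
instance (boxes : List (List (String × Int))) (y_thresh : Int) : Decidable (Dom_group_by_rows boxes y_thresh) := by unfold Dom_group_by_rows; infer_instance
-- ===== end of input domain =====

-- B replaces A's streaming state machine (current_row/last_y with trailing flush) by staged
-- passes: y-list, cut indices by a filtered range, rows by slicing between adjacent cuts.
-- Return-value equivalence; both Pythons sort `boxes` in place, so the side effect is identical.

-- shared helper: box[k] for a dict-as-assoc-list (first match; inside Pre_ the key is present
-- and keys are distinct, so this is exact for Python's box["y"] / box["x"])
def dGet (b : List (String × Int)) (k : String) : Int :=
  ((b.find? (fun p => p.1 == k)).map (fun p => p.2)).getD 0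

-- shared helper: sorted(row, key=lambda b: b["x"])
def sortX (r : List (List (String × Int))) : List (List (String × Int)) :=
  PySem.List.sorted r (fun b => dGet b "x") false

-- ===== PORT A =====
-- fold state: (rows, current_row, last_y)
def stepA (t : Int) (st : List (List (List (String × Int))) × List (List (String × Int)) × Int)
    (box : List (String × Int)) :
    List (List (List (String × Int))) × List (List (String × Int)) × Int :=
  let (rows, cur, lastY) := st
  if |dGet box "y" - lastY| > t then
    ((if cur ≠ [] then rows ++ [sortX cur] else rows), [box], dGet box "y")
  else
    (rows, cur ++ [box], dGet box "y")

def group_by_rows (boxes : List (List (String × Int))) (y_thresh : Int) :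
    List (List (List (String × Int))) :=
  let sortedBoxes := PySem.List.sorted boxes (fun b => dGet b "y") false
  let st := sortedBoxes.foldl (stepA y_thresh) ([], [], -1000)
  if st.2.1 ≠ [] then st.1 ++ [sortX st.2.1] else st.1

-- ===== PORT B =====
def group_by_rows_alt (boxes : List (List (String × Int))) (y_thresh : Int) :
    List (List (List (String × Int))) :=
  let s := PySem.List.sorted boxes (fun b => dGet b "y") false
  if s = [] then []
  else
    let n : Int := s.length
    let ys := s.map (fun b => dGet b "y")
    let cuts : List Int :=
      0 :: ((PySem.List.pyRange 1 n 1).filter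
        (fun i => decide (PySem.List.pyGetD ys i 0 - PySem.List.pyGetD ys (i - 1) 0 > y_thresh)))
        ++ [n]
    (cuts.zip cuts.tail).map
      (fun p => sortX (PySem.List.slice s (some p.1) (some p.2)))

-- ===== PRECONDITION & SPEC =====
-- Pre_ excludes boxes missing a "y" or "x" key (Python raises KeyError there) and boxes with
-- duplicate keys, which a Python dict cannot hold (the assoc-list representation is ambiguous).
def Pre_group_by_rows (boxes : List (List (String × Int))) (y_thresh : Int) : Prop :=
  ∀ b ∈ boxes, (b.map (fun p => p.1)).Nodup ∧
    (b.any (fun p => p.1 == "y")) = true ∧ (b.any (fun p => p.1 == "x")) = true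
instance (boxes : List (List (String × Int))) (y_thresh : Int) :
    Decidable (Pre_group_by_rows boxes y_thresh) := by unfold Pre_group_by_rows; infer_instance

def pvWitness_group_by_rows : (List (List (String × Int))) × Int :=
  ([[("y", 3), ("x", 7)], [("y", 40), ("x", 1)], [("y", 5), ("x", 2)]], 15)

def Spec_group_by_rows (boxes : List (List (String × Int))) (y_thresh : Int) (out : List (List (List (String × Int)))) : Prop := out = group_by_rows_alt boxes y_thresh
instance (boxes : List (List (String × Int))) (y_thresh : Int) (out : List (List (List (String × Int)))) : Decidable (Spec_group_by_rows boxes y_thresh out) := by unfold Spec_group_by_rows; infer_instance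

-- ===== CLAIM (what is proved, stated in full; the proofs are below) =====
def Claim_equal_group_by_rows : Prop := ∀ (boxes : List (List (String × Int))) (y_thresh : Int), Dom_group_by_rows boxes y_thresh → Pre_group_by_rows boxes y_thresh → Spec_group_by_rows boxes y_thresh (group_by_rows boxes y_thresh)

-- ===== LEMMAS AND PROOFS =====

-- Canonical description of the result, shared target of both directions: split the y-sorted
-- list into maximal runs of adjacent gap ≤ t.
def takeRun (t : Int) (prev : Int) : List (List (String × Int)) →
    List (List (String × Int)) × List (List (String × Int))
  | [] => ([], [])
  | b :: bs =>
    if dGet b "y" - prev ≤ t then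
      let p := takeRun t (dGet b "y") bs
      (b :: p.1, p.2)
    else ([], b :: bs)

theorem takeRun_rest_len (t prev : Int) (l : List (List (String × Int))) :
    (takeRun t prev l).2.length ≤ l.length := by
  induction l generalizing prev with
  | nil => simp [takeRun]
  | cons b bs ih =>
    simp only [takeRun]
    split
    · exact Nat.le_succ_of_le (ih _)
    · exact Nat.le_refl _

def splitRows (t : Int) : List (List (String × Int)) → List (List (List (String × Int)))
  | [] => []
  | b :: bs =>
    let p := takeRun t (dGet b "y") bs
    sortX (b :: p.1) :: splitRows t p.2
termination_by l => l.length
decreasing_by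
  exact Nat.lt_succ_of_le (takeRun_rest_len _ _ _)

-- ============ A-side: the fold equals splitRows on the sorted list ============

theorem loopA_run (t : Int) (l : List (List (String × Int)))
    (hl : l.Pairwise (fun a b => dGet a "y" ≤ dGet b "y"))
    (hge : ∀ b ∈ l, lastY ≤ dGet b "y")
    (rows : List (List (List (String × Int)))) (cur : List (List (String × Int)))
    (hcur : cur ≠ []) :
    (let st := l.foldl (stepA t) (rows, cur, lastY)
     if st.2.1 ≠ [] then st.1 ++ [sortX st.2.1] else st.1) =
    rows ++ (sortX (cur ++ (takeRun t lastY l).1) :: splitRows t (takeRun t lastY l).2) := by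
  induction l generalizing rows cur lastY with
  | nil => simp [takeRun, splitRows, hcur]
  | cons b bs ih =>
    have hb : lastY ≤ dGet b "y" := hge b (by simp)
    have habs : |dGet b "y" - lastY| = dGet b "y" - lastY := abs_of_nonneg (by omega)
    have hpw := (List.pairwise_cons.mp hl)
    by_cases hc : dGet b "y" - lastY ≤ t
    · have hcond : ¬ |dGet b "y" - lastY| > t := by rw [habs]; omega
      simp only [List.foldl_cons, stepA, if_neg hcond, takeRun, if_pos hc]
      rw [ih hpw.2 hpw.1 rows (cur ++ [b]) (by simp)]
      simp
    · have hcond : |dGet b "y" - lastY| > t := by rw [habs]; omega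
      simp only [List.foldl_cons, stepA, if_pos hcond, if_pos hcur, takeRun, if_neg hc]
      rw [ih hpw.2 hpw.1 (rows ++ [sortX cur]) [b] (by simp)]
      simp [splitRows]

theorem portA_eq_splitRows (boxes : List (List (String × Int))) (t : Int) :
    group_by_rows boxes t =
      splitRows t (PySem.List.sorted boxes (fun b => dGet b "y") false) := by
  unfold group_by_rows
  dsimp only
  have hpw := PySem.List.sorted_pairwise boxes (fun b => dGet b "y")
  generalize hg : PySem.List.sorted boxes (fun b => dGet b "y") false = s0
  rw [hg] at hpw
  cases s0 with
  | nil => simp [splitRows]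
  | cons b bs =>
    have hpw' := List.pairwise_cons.mp hpw
    have hfirst : (b :: bs).foldl (stepA t) ([], [], -1000) =
        bs.foldl (stepA t) ([], [b], dGet b "y") := by
      simp only [List.foldl_cons, stepA]
      split <;> simp
    rw [hfirst, loopA_run t bs hpw'.2 hpw'.1 [] [b] (by simp)]
    simp [splitRows]

-- ============ B-side: the cut/slice construction equals splitRows ============

-- Nat-level mirror of B's slicing between adjacent cut indices
def chunksN (s : List (List (String × Int))) (a : Nat) :
    List Nat → List (List (List (String × Int)))
  | [] => []
  | c :: cs => sortX ((s.drop a).take (c - a)) :: chunksN s c cs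

-- Nat-level mirror of B's filtered gap indices (k = left index of the gap)
def gapBreaks (t : Int) (ys : List Int) : List Nat :=
  (List.range (ys.length - 1)).filter (fun k => decide (ys.getD (k + 1) 0 - ys.getD k 0 > t))

def cutsFor (t : Int) (s : List (List (String × Int))) : List Nat :=
  (gapBreaks t (s.map (fun b => dGet b "y"))).map (· + 1) ++ [s.length]

theorem takeRun_append (t prev : Int) (l : List (List (String × Int))) :
    (takeRun t prev l).1 ++ (takeRun t prev l).2 = l := by
  induction l generalizing prev with
  | nil => simp [takeRun]
  | cons b bs ih =>
    simp only [takeRun]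
    split
    · simpa using ih _
    · simp

-- chain of gaps ≤ t inside a run, starting from prev
theorem takeRun_chain (t prev : Int) (l : List (List (String × Int))) :
    List.IsChain (fun a c => c - a ≤ t)
      (prev :: (takeRun t prev l).1.map (fun b => dGet b "y")) := by
  induction l generalizing prev with
  | nil => simp [takeRun]
  | cons b bs ih =>
    simp only [takeRun]
    split
    next h => exact List.IsChain.cons_cons h (ih _)
    next h => simp

-- when the run stops with a nonempty rest, the boundary gap is > t
theorem takeRun_stop (t prev : Int) (l : List (List (String × Int)))
    (c : List (String × Int)) (cs : List (List (String × Int)))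
    (h : (takeRun t prev l).2 = c :: cs) :
    dGet c "y" - ((takeRun t prev l).1.map (fun b => dGet b "y")).getLastD prev > t := by
  induction l generalizing prev with
  | nil => simp [takeRun] at h
  | cons b bs ih =>
    by_cases hc : dGet b "y" - prev ≤ t
    · simp only [takeRun, if_pos hc] at h ⊢
      rw [List.map_cons, List.getLastD_cons]
      exact ih _ h
    · simp only [takeRun, if_neg hc] at h ⊢
      cases h
      simp only [List.map_nil, List.getLastD_nil]
      omega

-- shift lemma for chunksN across an append
theorem chunksN_shift (u v : List (List (String × Int))) (a : Nat) (cs : List Nat) :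
    chunksN (u ++ v) (a + u.length) (cs.map (fun k => k + u.length)) = chunksN v a cs := by
  induction cs generalizing a with
  | nil => simp [chunksN]
  | cons c cs' ih =>
    simp only [List.map_cons, chunksN]
    rw [ih]
    congr 1
    have hdrop : (u ++ v).drop (a + u.length) = v.drop a := by
      rw [Nat.add_comm a u.length, List.drop_length_add_append]
    rw [hdrop]
    congr 1
    congr 1
    omega

-- gapBreaks of an append: the left part is a chain of small gaps and, when the right part is
-- nonempty, the boundary gap is large; the breaks are then the boundary plus the shifted
-- breaks of the right part
theorem gapBreaks_append (t : Int) (ysU ysV : List Int) (hU : ysU ≠ [])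
    (hchain : List.IsChain (fun a c => c - a ≤ t) ysU)
    (hbound : ∀ c cs, ysV = c :: cs → c - ysU.getLastD 0 > t) :
    gapBreaks t (ysU ++ ysV) =
      if ysV = [] then []
      else (ysU.length - 1) :: (gapBreaks t ysV).map (fun k => k + ysU.length) := by
  have hm : 1 ≤ ysU.length := List.length_pos_of_ne_nil hU
  have hsmall : ∀ k, k < ysU.length - 1 →
      ¬ ((ysU ++ ysV).getD (k + 1) 0 - (ysU ++ ysV).getD k 0 > t) := by
    intro k hk
    have h1 : k + 1 < ysU.length := by omega
    have h0 : k < ysU.length := by omega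
    rw [List.getD_append _ _ _ _ h1, List.getD_append _ _ _ _ h0,
      List.getD_eq_getElem _ _ h1, List.getD_eq_getElem _ _ h0]
    have := List.isChain_iff_getElem.mp hchain k h1
    omega
  cases ysV with
  | nil =>
    rw [if_pos rfl]
    unfold gapBreaks
    apply List.filter_eq_nil_iff.mpr
    intro k hk
    rw [List.mem_range] at hk
    simp only [List.append_nil] at hk ⊢
    simp only [decide_eq_true_iff]
    have := hsmall k (by simpa using hk)
    simp only [List.append_nil] at this
    exact this
  | cons c cs =>
    rw [if_neg (List.cons_ne_nil c cs)]
    unfold gapBreaks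
    have h2 : ysU.length - 1 + 1 = ysU.length := by omega
    have hranges : List.range ((ysU ++ c :: cs).length - 1)
        = (List.range (ysU.length - 1) ++ [ysU.length - 1])
          ++ (List.range cs.length).map (fun k => k + ysU.length) := by
      have hlen2 : (ysU ++ c :: cs).length - 1 = ysU.length + cs.length := by
        simp [List.length_append]
      rw [hlen2, List.range_add, ← h2, List.range_succ, h2]
      congr 1
      apply List.map_congr_left
      intro k _
      omega
    rw [hranges, List.filter_append, List.filter_append]
    have hp1 : (List.range (ysU.length - 1)).filter
        (fun k => decide ((ysU ++ c :: cs).getD (k + 1) 0 - (ysU ++ c :: cs).getD k 0 > t)) = [] := by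
      apply List.filter_eq_nil_iff.mpr
      intro k hk
      rw [List.mem_range] at hk
      simp only [decide_eq_true_iff]
      exact hsmall k hk
    have hbig : decide ((ysU ++ c :: cs).getD (ysU.length - 1 + 1) 0
        - (ysU ++ c :: cs).getD (ysU.length - 1) 0 > t) = true := by
      rw [h2, List.getD_append_right _ _ _ _ (Nat.le_refl _), Nat.sub_self,
        List.getD_append _ _ _ _ (by omega)]
      have hlast : ysU.getD (ysU.length - 1) 0 = ysU.getLastD 0 := by
        cases ysU with
        | nil => simp at hm
        | cons a l =>
          rw [List.getLastD_eq_getLast? , List.getLast?_eq_some_getLast (by simp),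
            Option.getD_some, List.getD_eq_getElem _ _ (by simp), List.getLast_eq_getElem]
          rfl
      rw [hlast]
      have hb := hbound c cs rfl
      simp only [List.getD_cons_zero, decide_eq_true_iff]
      omega
    have hmid : [ysU.length - 1].filter
        (fun k => decide ((ysU ++ c :: cs).getD (k + 1) 0 - (ysU ++ c :: cs).getD k 0 > t))
        = [ysU.length - 1] := by
      simp only [List.filter_cons, List.filter_nil]
      rw [hbig]
      simp
    rw [hp1, hmid, List.nil_append, List.cons_append, List.nil_append]
    congr 1
    rw [List.filter_map]
    have hcongr : (List.range cs.length).filter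
        ((fun k => decide ((ysU ++ c :: cs).getD (k + 1) 0 - (ysU ++ c :: cs).getD k 0 > t)) ∘
          (fun k => k + ysU.length)) =
        (List.range cs.length).filter
          (fun k => decide ((c :: cs).getD (k + 1) 0 - (c :: cs).getD k 0 > t)) := by
      apply List.filter_congr
      intro k _
      simp only [Function.comp_apply]
      have e1 : (ysU ++ c :: cs).getD (k + ysU.length + 1) 0 = (c :: cs).getD (k + 1) 0 := by
        rw [List.getD_append_right _ _ _ _ (by omega)]
        congr 1
        omega
      have e2 : (ysU ++ c :: cs).getD (k + ysU.length) 0 = (c :: cs).getD k 0 := by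
        rw [List.getD_append_right _ _ _ _ (by omega)]
        congr 1
        omega
      rw [e1, e2]
    rw [hcongr]
    have h3 : (c :: cs).length - 1 = cs.length := by simp
    rw [h3]

-- one step of the run decomposition, at the level of cut lists
theorem chunks_cuts_step (t : Int) (u v : List (List (String × Int))) (hu : u ≠ [])
    (hchain : List.IsChain (fun a c => c - a ≤ t) (u.map (fun x => dGet x "y")))
    (hbound : ∀ c cs, v = c :: cs →
      dGet c "y" - ((u.map (fun x => dGet x "y")).getLastD 0) > t)
    (hrec : v ≠ [] → chunksN v 0 (cutsFor t v) = splitRows t v) :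
    chunksN (u ++ v) 0 (cutsFor t (u ++ v)) = sortX u :: splitRows t v := by
  have hmne : u.map (fun x => dGet x "y") ≠ [] := by
    simpa using hu
  have hm : 1 ≤ u.length := List.length_pos_of_ne_nil hu
  have hbound' : ∀ c cs, v.map (fun x => dGet x "y") = c :: cs →
      c - (u.map (fun x => dGet x "y")).getLastD 0 > t := by
    intro c cs h
    cases v with
    | nil => simp at h
    | cons b0 v' =>
      rw [List.map_cons] at h
      cases h
      exact hbound b0 v' rfl
  have hgb := gapBreaks_append t (u.map (fun x => dGet x "y")) (v.map (fun x => dGet x "y"))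
    hmne hchain hbound'
  cases v with
  | nil =>
    rw [if_pos (by simp)] at hgb
    have hcuts : cutsFor t (u ++ []) = [u.length] := by
      unfold cutsFor
      rw [List.map_append, hgb]
      simp
    rw [hcuts]
    simp only [chunksN, List.append_nil, Nat.sub_zero, List.drop_zero, List.take_length]
    simp [splitRows]
  | cons c0 cs0 =>
    rw [if_neg (by simp)] at hgb
    have hcuts : cutsFor t (u ++ c0 :: cs0)
        = u.length :: (cutsFor t (c0 :: cs0)).map (fun k => k + u.length) := by
      unfold cutsFor
      rw [List.map_append, hgb]
      simp only [List.map_cons, List.map_map, List.map_append, List.length_append,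
        List.length_map, List.cons_append]
      congr 1
      · omega
      · congr 1
        · apply List.map_congr_left
          intro k _
          simp only [Function.comp_apply]
          omega
        · simp only [List.length_cons]
          congr 1
          omega
    rw [hcuts]
    simp only [chunksN, Nat.sub_zero, List.drop_zero, List.take_left]
    congr 1
    have hsh := chunksN_shift u (c0 :: cs0) 0 (cutsFor t (c0 :: cs0))
    rw [Nat.zero_add] at hsh
    rw [hsh]
    exact hrec (List.cons_ne_nil c0 cs0)

-- main: chunks between the computed cuts = splitRows, by strong induction on the length
theorem chunks_cuts_aux (t : Int) : ∀ (N : Nat) (s : List (List (String × Int))),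
    s.length ≤ N → s ≠ [] → chunksN s 0 (cutsFor t s) = splitRows t s := by
  intro N
  induction N with
  | zero =>
    intro s hlen hs
    cases s with
    | nil => exact absurd rfl hs
    | cons b bs => simp at hlen
  | succ N ih =>
    intro s hlen hs
    cases s with
    | nil => exact absurd rfl hs
    | cons b bs =>
      have hchain : List.IsChain (fun a c => c - a ≤ t)
          ((b :: (takeRun t (dGet b "y") bs).1).map (fun x => dGet x "y")) := by
        simpa using takeRun_chain t (dGet b "y") bs
      have hbound : ∀ c cs, (takeRun t (dGet b "y") bs).2 = c :: cs →
          dGet c "y" - (((b :: (takeRun t (dGet b "y") bs).1).map (fun x => dGet x "y")).getLastD 0) > t := by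
        intro c cs h
        have hst := takeRun_stop t (dGet b "y") bs c cs h
        rw [List.map_cons, List.getLastD_cons]
        exact hst
      have hrec : (takeRun t (dGet b "y") bs).2 ≠ [] →
          chunksN (takeRun t (dGet b "y") bs).2 0 (cutsFor t (takeRun t (dGet b "y") bs).2)
            = splitRows t (takeRun t (dGet b "y") bs).2 := by
        intro hne
        apply ih _ _ hne
        have h1 := takeRun_rest_len t (dGet b "y") bs
        have h2 : bs.length ≤ N := by simpa using hlen
        omega
      have hstep := chunks_cuts_step t (b :: (takeRun t (dGet b "y") bs).1)
        (takeRun t (dGet b "y") bs).2 (List.cons_ne_nil _ _) hchain hbound hrec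
      have hsplit : (b :: (takeRun t (dGet b "y") bs).1) ++ (takeRun t (dGet b "y") bs).2
          = b :: bs := by
        simpa using takeRun_append t (dGet b "y") bs
      calc chunksN (b :: bs) 0 (cutsFor t (b :: bs))
          = chunksN ((b :: (takeRun t (dGet b "y") bs).1) ++ (takeRun t (dGet b "y") bs).2) 0
              (cutsFor t ((b :: (takeRun t (dGet b "y") bs).1) ++ (takeRun t (dGet b "y") bs).2)) := by
            rw [hsplit]
        _ = sortX (b :: (takeRun t (dGet b "y") bs).1) :: splitRows t (takeRun t (dGet b "y") bs).2 :=
            hstep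
        _ = splitRows t (b :: bs) := by
            simp [splitRows]

theorem chunks_cuts_eq_splitRows (t : Int) (s : List (List (String × Int))) (hs : s ≠ []) :
    chunksN s 0 (cutsFor t s) = splitRows t s :=
  chunks_cuts_aux t s.length s (Nat.le_refl _) hs

-- bridge: B's Int-valued zip/slice expression = chunksN on Nat cuts
theorem zip_slice_eq_chunksN (s : List (List (String × Int))) (a : Nat) (cs : List Nat) :
    ((((a :: cs).map (fun k : Nat => (k : Int))).zip (cs.map (fun k : Nat => (k : Int)))).map
      (fun p => sortX (PySem.List.slice s (some p.1) (some p.2)))) = chunksN s a cs := by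
  induction cs generalizing a with
  | nil => simp [chunksN]
  | cons c cs' ih =>
    simp only [List.map_cons, List.zip_cons_cons, List.map_cons, chunksN]
    rw [← ih c]
    congr 1
    rw [PySem.List.slice_natCast]

theorem portB_eq_splitRows (boxes : List (List (String × Int))) (t : Int) :
    group_by_rows_alt boxes t =
      splitRows t (PySem.List.sorted boxes (fun b => dGet b "y") false) := by
  unfold group_by_rows_alt
  dsimp only
  generalize hg : PySem.List.sorted boxes (fun b => dGet b "y") false = s
  by_cases hs : s = []
  · subst hs
    simp [splitRows]
  · rw [if_neg hs]
    have hcuts : (0 : Int) :: ((PySem.List.pyRange 1 (s.length : Int) 1).filter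
          (fun i => decide (PySem.List.pyGetD (s.map (fun b => dGet b "y")) i 0
            - PySem.List.pyGetD (s.map (fun b => dGet b "y")) (i - 1) 0 > t)))
        ++ [(s.length : Int)]
        = ((0 : Nat) :: cutsFor t s).map (fun k : Nat => (k : Int)) := by
      rw [PySem.List.pyRange_one]
      have hn : (((s.length : Int)) - 1).toNat = s.length - 1 := by omega
      rw [hn, List.filter_map]
      have hfc : (List.range (s.length - 1)).filter
            ((fun i => decide (PySem.List.pyGetD (s.map (fun b => dGet b "y")) i 0
              - PySem.List.pyGetD (s.map (fun b => dGet b "y")) (i - 1) 0 > t)) ∘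
              (fun k : Nat => (1 : Int) + (k : Int)))
          = gapBreaks t (s.map (fun b => dGet b "y")) := by
        unfold gapBreaks
        rw [List.length_map]
        apply List.filter_congr
        intro k _
        simp only [Function.comp_apply]
        have e1 : (1 : Int) + (k : Int) = ((k + 1 : Nat) : Int) := by push_cast; ring
        rw [e1]
        rw [show ((k + 1 : Nat) : Int) - 1 = ((k : Nat) : Int) from by push_cast; ring]
        rw [PySem.List.pyGetD_natCast, PySem.List.pyGetD_natCast]
      rw [hfc]
      unfold cutsFor
      simp only [List.map_cons, List.map_append, List.map_map, List.map_nil, Nat.cast_zero]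
      have hmm : List.map ((fun k : Nat => (k : Int)) ∘ fun x => x + 1)
          (gapBreaks t (s.map (fun b => dGet b "y")))
          = List.map (fun k : Nat => (1 : Int) + (k : Int))
          (gapBreaks t (s.map (fun b => dGet b "y"))) := by
        apply List.map_congr_left
        intro k _
        simp only [Function.comp_apply]
        push_cast
        ring
      rw [hmm]
      simp
    rw [hcuts]
    have htl : (((0 : Nat) :: cutsFor t s).map (fun k : Nat => (k : Int))).tail
        = (cutsFor t s).map (fun k : Nat => (k : Int)) := by
      simp
    rw [htl]
    have hz := zip_slice_eq_chunksN s 0 (cutsFor t s)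
    simp only [List.map_cons, Nat.cast_zero] at hz ⊢
    rw [hz]
    exact chunks_cuts_eq_splitRows t s hs

-- ===== VERDICT (by name: the statement is the Claim_ definition above) =====
theorem group_by_rows_spec : Claim_equal_group_by_rows := by
  intro boxes t _ _
  show group_by_rows boxes t = group_by_rows_alt boxes t
  rw [portA_eq_splitRows, portB_eq_splitRows]
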